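-- pv_equiv track=rewrite | github.com/mkierc/advent-of-code | 2025/src/day_10/part_1.py | generate_new_possible_states
-- ===== SOURCE A (Python) =====
-- def generate_new_possible_states(current_state, button_list):
--     new_states = []
--     for buttons in button_list:
--         new_state = list(current_state)
--         for button_press in buttons:
--             if new_state[button_press] == '.':
--                 new_state[button_press] = '#'
--             elif new_state[button_press] == '#':
--                 new_state[button_press] = '.'
--         new_states.append(tuple(new_state))
--     return new_states
-- ===== SOURCE B (Python) =====
-- def _flip(c):
--     return '#' if c == '.' else '.' if c == '#' else c
--
--
-- def generate_new_possible_states(current_state, button_list):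
--     new_states = []
--     for buttons in button_list:
--         counts = {}
--         for b in buttons:
--             counts[b] = counts.get(b, 0) + 1
--         new_state = list(current_state)
--         for b, k in counts.items():
--             if k % 2 == 1:
--                 new_state[b] = _flip(new_state[b])
--         new_states.append(tuple(new_state))
--     return new_states
-- ===== Notes on version B (the rewrite author's own statement) =====
-- stated objective: alternative
-- what changed: Instead of toggling the state once per individual press, B counts the presses of each button in a dict and then flips each odd-count position exactly once; Pre_ only excludes inputs where A raises IndexError (a press index out of the state's range).
import Mathlib
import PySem

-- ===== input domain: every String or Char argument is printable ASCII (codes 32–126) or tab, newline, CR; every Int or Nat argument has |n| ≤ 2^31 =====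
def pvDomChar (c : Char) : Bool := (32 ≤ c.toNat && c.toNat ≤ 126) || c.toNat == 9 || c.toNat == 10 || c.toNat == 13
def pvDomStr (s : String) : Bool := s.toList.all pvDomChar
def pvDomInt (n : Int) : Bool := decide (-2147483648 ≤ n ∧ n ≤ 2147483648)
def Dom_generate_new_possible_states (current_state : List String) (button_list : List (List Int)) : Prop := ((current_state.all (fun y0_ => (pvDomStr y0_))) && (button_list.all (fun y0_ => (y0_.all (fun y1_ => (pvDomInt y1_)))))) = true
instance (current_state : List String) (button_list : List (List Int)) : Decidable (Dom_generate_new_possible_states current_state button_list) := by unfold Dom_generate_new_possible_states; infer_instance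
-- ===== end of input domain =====

-- B replaces A's sequential per-press toggling by counting presses per button in a dict and
-- flipping each odd-count position exactly once (objective: alternative decomposition, same cost).


-- ===== PORT A =====
-- the body of A's inner 'for button_press in buttons' loop: read new_state[button_press], write back
def pvToggle (new_state : List String) (button_press : Int) : List String :=
  if PySem.List.pyGetD new_state button_press "" == "." then
    PySem.List.pySetD new_state button_press "#"
  else if PySem.List.pyGetD new_state button_press "" == "#" then
    PySem.List.pySetD new_state button_press "."
  else new_state

def generate_new_possible_states (current_state : List String) (button_list : List (List Int)) : List (List String) :=
  button_list.foldl
    (fun new_states buttons => new_states ++ [buttons.foldl pvToggle current_state]) []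

-- ===== PORT B =====
-- Source B _flip: '#' if c == '.' else '.' if c == '#' else c
def pvFlip (c : String) : String := if c == "." then "#" else if c == "#" then "." else c

def generate_new_possible_states_alt (current_state : List String) (button_list : List (List Int)) : List (List String) :=
  button_list.foldl
    (fun new_states buttons =>
      -- counts = {}; for b in buttons: counts[b] = counts.get(b, 0) + 1
      let counts := buttons.foldl (fun d b => d.insert b (d.getD b 0 + 1)) PySem.Dict.empty
      -- new_state = list(current_state); for b, k in counts.items(): if k % 2 == 1: flip
      let new_state := counts.items.foldl
        (fun st bk =>
          if PySem.Int.mod bk.2 2 == 1 then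
            PySem.List.pySetD st bk.1 (pvFlip (PySem.List.pyGetD st bk.1 ""))
          else st)
        current_state
      new_states ++ [new_state]) []

-- ===== PRECONDITION & SPEC =====
-- Pre_ excludes exactly the inputs where A raises IndexError: some pressed index outside
-- Python's valid range [-len(current_state), len(current_state)) for the state list.
def Pre_generate_new_possible_states (current_state : List String) (button_list : List (List Int)) : Prop :=
  ∀ buttons ∈ button_list, ∀ b ∈ buttons, PySem.Raise.InRange current_state.length b

instance (current_state : List String) (button_list : List (List Int)) : Decidable (Pre_generate_new_possible_states current_state button_list) := by unfold Pre_generate_new_possible_states; infer_instance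

def pvWitness_generate_new_possible_states : List String × List (List Int) :=
  ([".", "#", "x"], [[0, 2, -1, 0, 1], [1, 1, 2]])

def Spec_generate_new_possible_states (current_state : List String) (button_list : List (List Int)) (out : List (List String)) : Prop := out = generate_new_possible_states_alt current_state button_list
instance (current_state : List String) (button_list : List (List Int)) (out : List (List String)) : Decidable (Spec_generate_new_possible_states current_state button_list out) := by unfold Spec_generate_new_possible_states; infer_instance

-- ===== CLAIM (what is proved, stated in full; the proofs are below) =====
def Claim_equal_generate_new_possible_states : Prop := ∀ (current_state : List String) (button_list : List (List Int)), Dom_generate_new_possible_states current_state button_list → Pre_generate_new_possible_states current_state button_list → Spec_generate_new_possible_states current_state button_list (generate_new_possible_states current_state button_list)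

-- ===== LEMMAS AND PROOFS =====

-- the non-negative position a valid Python index denotes (proof-only helper)
def pvNorm (n : Nat) (b : Int) : Int := if 0 ≤ b then b else b + n

theorem pvFlip_pvFlip (c : String) : pvFlip (pvFlip c) = c := by
  unfold pvFlip
  by_cases h1 : c = "."
  · simp [h1]
  · by_cases h2 : c = "#" <;> simp [h1, h2]

theorem pvNorm_bounds {n : Nat} {b : Int} (h : PySem.Raise.InRange n b) :
    0 ≤ pvNorm n b ∧ pvNorm n b < n := by
  obtain ⟨h1, h2⟩ := h
  unfold pvNorm
  split <;> omega

theorem pyIdx?_eq_norm {n : Nat} {b : Int} (h : PySem.Raise.InRange n b) :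
    PySem.List.pyIdx? n b = some (pvNorm n b).toNat := by
  obtain ⟨h1, h2⟩ := h
  unfold PySem.List.pyIdx? pvNorm
  by_cases hb : 0 ≤ b
  · rw [if_pos hb, if_pos h2, if_pos hb]
  · rw [if_neg hb, if_pos h1, if_neg hb]
    congr 1
    omega

theorem pyGetD_eq_norm {xs : List String} {b : Int} (h : PySem.Raise.InRange xs.length b) (d : String) :
    PySem.List.pyGetD xs b d = xs.getD (pvNorm xs.length b).toNat d := by
  have hb := pvNorm_bounds h
  unfold PySem.List.pyGetD PySem.List.pyGet?
  rw [pyIdx?_eq_norm h]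
  simp [List.getD_eq_getElem?_getD]

theorem pySetD_eq_norm {xs : List String} {b : Int} (h : PySem.Raise.InRange xs.length b) (v : String) :
    PySem.List.pySetD xs b v = xs.set (pvNorm xs.length b).toNat v := by
  unfold PySem.List.pySetD PySem.List.pySet?
  rw [pyIdx?_eq_norm h]
  simp

-- one A-press is: write the flip of the read cell back (a no-op write when neither '.' nor '#')
theorem pvToggle_eq_set {st : List String} {b : Int} (h : PySem.Raise.InRange st.length b) :
    pvToggle st b = st.set (pvNorm st.length b).toNat (pvFlip (st.getD (pvNorm st.length b).toNat "")) := by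
  have hb := pvNorm_bounds h
  have hk : (pvNorm st.length b).toNat < st.length := by omega
  unfold pvToggle
  rw [pyGetD_eq_norm h, List.getD_eq_getElem st "" hk]
  by_cases h1 : st[(pvNorm st.length b).toNat] = "."
  · simp [pvFlip, h1, pySetD_eq_norm h]
  · by_cases h2 : st[(pvNorm st.length b).toNat] = "#"
    · simp [pvFlip, h2, pySetD_eq_norm h]
    · simp [pvFlip, h1, h2, List.set_getElem_self hk]

-- one B-flip equals one A-press on an in-range index
theorem pvFlipStep_eq_toggle {st : List String} {b : Int} (h : PySem.Raise.InRange st.length b) :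
    PySem.List.pySetD st b (pvFlip (PySem.List.pyGetD st b "")) = pvToggle st b := by
  rw [pvToggle_eq_set h, pySetD_eq_norm h, pyGetD_eq_norm h]

theorem pvToggle_length (st : List String) (b : Int) : (pvToggle st b).length = st.length := by
  unfold pvToggle PySem.List.pySetD PySem.List.pySet?
  split
  · cases PySem.List.pyIdx? st.length b <;> simp
  · split
    · cases PySem.List.pyIdx? st.length b <;> simp
    · rfl

theorem foldl_pvToggle_length (buttons : List Int) (st : List String) :
    (buttons.foldl pvToggle st).length = st.length := by
  induction buttons generalizing st with
  | nil => rfl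
  | cons b bs ih => simpa [List.foldl_cons, pvToggle_length] using ih (pvToggle st b)

-- after a whole press list, cell k holds its original value, flipped iff pressed an odd number of times
theorem foldl_pvToggle_getD (buttons : List Int) (n : Nat) :
    ∀ st : List String, st.length = n → (∀ b ∈ buttons, PySem.Raise.InRange n b) →
    ∀ k : Nat, k < n →
    (buttons.foldl pvToggle st).getD k "" =
      if Odd (buttons.countP (fun b => decide (pvNorm n b = (k : Int)))) then pvFlip (st.getD k "")
      else st.getD k "" := by
  induction buttons with
  | nil => intro st hlen hv k hk; simp
  | cons b bs ih =>
    intro st hlen hv k hk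
    have hvb : PySem.Raise.InRange n b := hv b (List.mem_cons_self ..)
    have hvb' : PySem.Raise.InRange st.length b := by rw [hlen]; exact hvb
    have hb := pvNorm_bounds hvb
    rw [List.foldl_cons, ih (pvToggle st b) (by rw [pvToggle_length, hlen])
        (fun x hx => hv x (List.mem_cons_of_mem _ hx)) k hk]
    have hset : (pvToggle st b).getD k "" =
        if pvNorm n b = (k : Int) then pvFlip (st.getD k "") else st.getD k "" := by
      rw [pvToggle_eq_set hvb', hlen]
      have hk' : k < st.length := by omega
      have hj : (pvNorm n b).toNat < st.length := by omega
      rw [List.getD_eq_getElem _ "" (by simpa [hlen] using hk')]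
      rw [List.getElem_set]
      by_cases he : pvNorm n b = (k : Int)
      · have hjk : (pvNorm n b).toNat = k := by omega
        simp [he, List.getElem?_eq_getElem hk']
      · have hjk : (pvNorm n b).toNat ≠ k := by omega
        simp [he, hjk, List.getElem?_eq_getElem hk']
    rw [hset, List.countP_cons]
    by_cases he : pvNorm n b = (k : Int)
    · simp only [he, decide_true, if_true, Nat.odd_add_one]
      by_cases ho : Odd (bs.countP (fun b => decide (pvNorm n b = (k : Int))))
      · simp [ho, pvFlip_pvFlip]
      · simp [ho]
    · simp [he]

-- a guarded fold is the fold over the filtered list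
theorem foldl_guard {α β : Type} (p : α → Bool) (f : β → α → β) :
    ∀ (l : List α) (init : β),
      l.foldl (fun st b => if p b then f st b else st) init = (l.filter p).foldl f init := by
  intro l
  induction l with
  | nil => intro init; rfl
  | cons b bs ih =>
    intro init
    by_cases hb : p b <;> simp [hb, ih]

-- B's flip loop equals A's press loop run on the same index list (all indices in range)
theorem foldl_flipStep_eq (L : List Int) :
    ∀ st : List String, (∀ b ∈ L, PySem.Raise.InRange st.length b) →
    L.foldl (fun st b => PySem.List.pySetD st b (pvFlip (PySem.List.pyGetD st b ""))) st =
      L.foldl pvToggle st := by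
  induction L with
  | nil => intro st _; rfl
  | cons b bs ih =>
    intro st hv
    rw [List.foldl_cons, List.foldl_cons, pvFlipStep_eq_toggle (hv b (List.mem_cons_self ..))]
    exact ih (pvToggle st b)
      (fun x hx => by rw [pvToggle_length]; exact hv x (List.mem_cons_of_mem _ hx))

-- Python's c % 2 == 1 on a nonnegative count is oddness
theorem mod_two_eq_one_iff_odd (c : Nat) :
    ((PySem.Int.mod (c : Int) 2 == 1) = true) ↔ Odd c := by
  have h2 : PySem.Int.mod (c : Int) 2 = (c : Int) % 2 := by
    simp only [PySem.Int.mod]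
    rw [Int.fmod_eq_emod]
    omega
  rw [beq_iff_eq, h2, Nat.odd_iff]
  omega

-- counting indices that denote cell k = counting the two raw values k and k - n
theorem countP_norm_eq (n k : Nat) (hk : k < n) :
    ∀ l : List Int, (∀ b ∈ l, PySem.Raise.InRange n b) →
    l.countP (fun b => decide (pvNorm n b = (k : Int))) =
      l.count (k : Int) + l.count ((k : Int) - n) := by
  intro l
  induction l with
  | nil => intro _; rfl
  | cons b bs ih =>
    intro hv
    obtain ⟨h1, h2⟩ := hv b (List.mem_cons_self ..)
    rw [List.countP_cons, List.count_cons, List.count_cons,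
        ih (fun x hx => hv x (List.mem_cons_of_mem _ hx))]
    have hnorm : (pvNorm n b = (k : Int)) ↔ (b = (k : Int) ∨ b = (k : Int) - n) := by
      unfold pvNorm
      split_ifs <;> omega
    have hkn : ((k : Int)) ≠ (k : Int) - n := by omega
    have hkn' : ((k : Int) - n) ≠ (k : Int) := by omega
    simp only [decide_eq_true_eq, beq_iff_eq, hnorm]
    by_cases hb1 : b = (k : Int) <;> by_cases hb2 : b = (k : Int) - n <;>
      simp [hb1, hb2, hkn, hkn'] <;> omega

theorem count_nodup_ite {l : List Int} (h : l.Nodup) (x : Int) :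
    l.count x = if x ∈ l then 1 else 0 := by
  by_cases hm : x ∈ l
  · rw [if_pos hm]
    exact List.count_eq_one_of_mem h hm
  · rw [if_neg hm]
    exact List.count_eq_zero_of_not_mem hm

-- one button group: counting-then-flipping equals sequential toggling
theorem group_eq (cs : List String) (buttons : List Int)
    (hv : ∀ b ∈ buttons, PySem.Raise.InRange cs.length b) :
    ((buttons.foldl (fun d b => d.insert b (d.getD b 0 + 1)) PySem.Dict.empty).items).foldl
        (fun st bk =>
          if PySem.Int.mod bk.2 2 == 1 then
            PySem.List.pySetD st bk.1 (pvFlip (PySem.List.pyGetD st bk.1 ""))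
          else st) cs
      = buttons.foldl pvToggle cs := by
  rw [PySem.Dict.foldl_insert_getD_add_one_eq_counter, PySem.Dict.items_counter, List.foldl_map]
  rw [foldl_guard (fun b => PySem.Int.mod ((buttons.count b : Int)) 2 == 1)
        (fun st b => PySem.List.pySetD st b (pvFlip (PySem.List.pyGetD st b ""))) _ cs]
  set L := (PySem.Set.ofList buttons).filter
      (fun b => PySem.Int.mod ((buttons.count b : Int)) 2 == 1) with hL
  have hLsub : ∀ b ∈ L, b ∈ buttons := by
    intro b hb
    have := (List.mem_filter.1 hb).1
    exact (PySem.Set.mem_ofList _ _).1 this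
  have hLv : ∀ b ∈ L, PySem.Raise.InRange cs.length b := fun b hb => hv b (hLsub b hb)
  rw [foldl_flipStep_eq L cs hLv]
  -- both sides are pvToggle folds; compare cellwise by parity
  apply List.ext_getElem
  · rw [foldl_pvToggle_length, foldl_pvToggle_length]
  · intro k hk1 hk2
    have hn : k < cs.length := by rwa [foldl_pvToggle_length] at hk1
    have hnpos : 0 < cs.length := Nat.lt_of_le_of_lt (Nat.zero_le k) hn
    have hLnd : L.Nodup := (PySem.Set.nodup_ofList buttons).filter _
    have hA := foldl_pvToggle_getD buttons cs.length cs rfl hv k hn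
    have hB := foldl_pvToggle_getD L cs.length cs rfl hLv k hn
    rw [← List.getD_eq_getElem _ "" hk1, ← List.getD_eq_getElem _ "" hk2, hA, hB]
    have hcA := countP_norm_eq cs.length k hn buttons hv
    have hcB := countP_norm_eq cs.length k hn L hLv
    -- membership in L is parity of the press count
    have hmemL : ∀ x : Int, x ∈ L ↔ x ∈ buttons ∧ Odd (buttons.count x) := by
      intro x
      rw [hL, List.mem_filter, PySem.Set.mem_ofList, mod_two_eq_one_iff_odd]
    have hcount : ∀ x : Int, L.count x = if Odd (buttons.count x) then 1 else 0 := by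
      intro x
      rw [count_nodup_ite hLnd x]
      by_cases ho : Odd (buttons.count x)
      · have hx : x ∈ buttons := by
          rcases List.count_pos_iff.mp (Nat.pos_of_ne_zero (by rintro h; rw [h] at ho; simp at ho)) with h
          exact h
        simp [hmemL, hx, ho]
      · simp [hmemL, ho]
    rw [hcA, hcB, hcount, hcount]
    have hoiff : Odd ((if Odd (buttons.count (k : Int)) then 1 else 0) +
        (if Odd (buttons.count ((k : Int) - cs.length)) then 1 else 0)) ↔
        Odd (buttons.count (k : Int) + buttons.count ((k : Int) - cs.length)) := by
      simp only [Nat.odd_iff]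
      by_cases h1 : buttons.count (k : Int) % 2 = 1 <;>
        by_cases h2 : buttons.count ((k : Int) - cs.length) % 2 = 1 <;>
        simp [h1, h2] <;> omega
    rw [if_congr hoiff rfl rfl]

-- ===== VERDICT (by name: the statement is the Claim_ definition above) =====
theorem generate_new_possible_states_spec : Claim_equal_generate_new_possible_states := by
  intro current_state button_list _ hpre
  unfold Spec_generate_new_possible_states generate_new_possible_states generate_new_possible_states_alt
  rw [PySem.List.foldl_append_singleton_eq_map, PySem.List.foldl_append_singleton_eq_map,
      List.nil_append, List.nil_append]
  apply List.map_congr_left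
  intro buttons hmem
  exact (group_eq current_state buttons (hpre buttons hmem)).symm
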